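-- pv_equiv track=rewrite | github.com/GM-Doolin/redder | CS325_p3/module_2/saai.py | TallySentiments
-- ===== SOURCE A (Python) =====
-- def TallySentiments(sentiments: [str]) -> [int]:
--     try:
--         sentimentTally = {"positive": 0, "neutral": 0, "negative": 0}
--         for sentiment in sentiments:
--             match sentiment:
--                 case "positive":
--                     sentimentTally["positive"] += 1
--                 case "neutral":
--                     sentimentTally["neutral"] += 1
--                 case "negative":
--                     sentimentTally["negative"] += 1
--         return [sentimentTally["positive"], sentimentTally["neutral"], sentimentTally["negative"]]
--     except Exception as e:
--         raise e
-- ===== SOURCE B (Python) =====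
-- def TallySentiments(sentiments: [str]) -> [int]:
--     # Vectorize: map each sentiment to a one-hot triple, then sum columnwise.
--     hot = [(1, 0, 0) if s == "positive"
--            else (0, 1, 0) if s == "neutral"
--            else (0, 0, 1) if s == "negative"
--            else (0, 0, 0)
--            for s in sentiments]
--     return [sum(t[0] for t in hot), sum(t[1] for t in hot), sum(t[2] for t in hot)]
-- ===== Notes on version B (the rewrite author's own statement) =====
-- stated objective: alternative
-- what changed: Replaces the dict tally updated by a match statement with a map-reduce: each string is first mapped to a one-hot (p,n,g) triple, and the result is the columnwise sum of that intermediate list.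
import Mathlib
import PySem

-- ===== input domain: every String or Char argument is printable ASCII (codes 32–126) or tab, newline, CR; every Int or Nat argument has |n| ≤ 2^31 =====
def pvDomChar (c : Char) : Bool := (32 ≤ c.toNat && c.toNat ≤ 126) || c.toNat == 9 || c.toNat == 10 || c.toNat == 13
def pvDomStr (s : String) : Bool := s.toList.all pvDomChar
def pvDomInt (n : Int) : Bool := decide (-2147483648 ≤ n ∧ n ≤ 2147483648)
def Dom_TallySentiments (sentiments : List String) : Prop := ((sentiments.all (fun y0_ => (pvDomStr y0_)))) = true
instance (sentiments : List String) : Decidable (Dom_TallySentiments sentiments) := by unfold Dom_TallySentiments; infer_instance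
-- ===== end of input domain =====

-- ===== PORT A =====
-- B replaces the dict tally + match with a map to one-hot triples followed by columnwise sums.
def TallySentiments (sentiments : List String) : List Int :=
  let sentimentTally : PySem.Dict String Int :=
    PySem.Dict.ofList [("positive", 0), ("neutral", 0), ("negative", 0)]
  let sentimentTally := sentiments.foldl (fun d sentiment =>
    if sentiment == "positive" then d.modify "positive" 0 (· + 1)
    else if sentiment == "neutral" then d.modify "neutral" 0 (· + 1)
    else if sentiment == "negative" then d.modify "negative" 0 (· + 1)
    else d) sentimentTally
  [sentimentTally.getD "positive" 0, sentimentTally.getD "neutral" 0,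
   sentimentTally.getD "negative" 0]

-- ===== PORT B =====
def pvOneHot (s : String) : Int × Int × Int :=
  if s == "positive" then (1, 0, 0)
  else if s == "neutral" then (0, 1, 0)
  else if s == "negative" then (0, 0, 1)
  else (0, 0, 0)

def TallySentiments_alt (sentiments : List String) : List Int :=
  let hot := sentiments.map pvOneHot
  [(hot.map (·.1)).sum, (hot.map (·.2.1)).sum, (hot.map (·.2.2)).sum]

-- ===== PRECONDITION & SPEC =====
def Spec_TallySentiments (sentiments : List String) (out : List Int) : Prop := out = TallySentiments_alt sentiments
instance (sentiments : List String) (out : List Int) : Decidable (Spec_TallySentiments sentiments out) := by unfold Spec_TallySentiments; infer_instance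

-- ===== CLAIM (what is proved, stated in full; the proofs are below) =====
def Claim_equal_TallySentiments : Prop := ∀ (sentiments : List String), Dom_TallySentiments sentiments → Spec_TallySentiments sentiments (TallySentiments sentiments)

-- ===== LEMMAS AND PROOFS =====
theorem tally_getD (sentiments : List String) (d : PySem.Dict String Int) (k : String)
    (hk : k = "positive" ∨ k = "neutral" ∨ k = "negative") :
    (sentiments.foldl (fun d sentiment =>
      if sentiment == "positive" then d.modify "positive" 0 (· + 1)
      else if sentiment == "neutral" then d.modify "neutral" 0 (· + 1)
      else if sentiment == "negative" then d.modify "negative" 0 (· + 1)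
      else d) d).getD k 0 = d.getD k 0 + (sentiments.count k : Int) := by
  induction sentiments generalizing d with
  | nil => simp
  | cons s rest ih =>
    simp only [List.foldl_cons, List.count_cons]
    rw [ih]
    by_cases hs : s = k
    · subst hs
      rcases hk with h | h | h <;> subst h <;> simp <;> try ring
    · have : (s == k) = false := by simp [hs]
      rcases hk with h | h | h <;> subst h <;>
        split_ifs with h1 h2 h3 <;>
        simp_all [PySem.Dict.getD_modify]

theorem onehot_fst_sum (l : List String) :
    ((l.map pvOneHot).map (·.1)).sum = (l.count "positive" : Int) := by
  induction l with
  | nil => simp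
  | cons s rest ih =>
    simp only [List.map_cons, List.sum_cons, List.count_cons, ih, pvOneHot]
    by_cases h : s = "positive" <;> simp [h] <;> (try split_ifs) <;> simp_all <;> omega

theorem onehot_snd_sum (l : List String) :
    ((l.map pvOneHot).map (·.2.1)).sum = (l.count "neutral" : Int) := by
  induction l with
  | nil => simp
  | cons s rest ih =>
    simp only [List.map_cons, List.sum_cons, List.count_cons, ih, pvOneHot]
    by_cases h : s = "neutral" <;> simp [h] <;> (try split_ifs) <;> simp_all <;> omega

theorem onehot_thd_sum (l : List String) :
    ((l.map pvOneHot).map (·.2.2)).sum = (l.count "negative" : Int) := by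
  induction l with
  | nil => simp
  | cons s rest ih =>
    simp only [List.map_cons, List.sum_cons, List.count_cons, ih, pvOneHot]
    by_cases h : s = "negative" <;> simp [h] <;> (try split_ifs) <;> simp_all <;> omega

-- ===== VERDICT (by name: the statement is the Claim_ definition above) =====
theorem TallySentiments_spec : Claim_equal_TallySentiments := by
  intro sentiments _
  show TallySentiments sentiments = TallySentiments_alt sentiments
  simp only [TallySentiments, TallySentiments_alt]
  rw [tally_getD _ _ _ (Or.inl rfl), tally_getD _ _ _ (Or.inr (Or.inl rfl)),
      tally_getD _ _ _ (Or.inr (Or.inr rfl)),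
      onehot_fst_sum, onehot_snd_sum, onehot_thd_sum]
  have hp : (PySem.Dict.ofList [("positive", (0:Int)), ("neutral", 0), ("negative", 0)]).getD "positive" 0 = 0 := by decide
  have hn : (PySem.Dict.ofList [("positive", (0:Int)), ("neutral", 0), ("negative", 0)]).getD "neutral" 0 = 0 := by decide
  have hg : (PySem.Dict.ofList [("positive", (0:Int)), ("neutral", 0), ("negative", 0)]).getD "negative" 0 = 0 := by decide
  simp [hp, hn, hg]
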